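-- pv_equiv track=rewrite | github.com/leiyang2003/Local-Model | dynamic-prompt.py | _history_to_tuples
-- ===== SOURCE A (Python) =====
-- def _history_to_tuples(history: list) -> list:
--     """Convert Gradio 4 message list to (user, assistant) pairs for internal use."""
--     if not history:
--         return []
--     if isinstance(history[0], dict):
--         pairs = []
--         i = 0
--         while i < len(history):
--             role = history[i].get("role", "")
--             content = history[i].get("content", "") or ""
--             if role == "user":
--                 asst = ""
--                 if i + 1 < len(history) and history[i + 1].get("role") == "assistant":
--                     asst = history[i + 1].get("content", "") or ""
--                     i += 1
--                 pairs.append((content, asst))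
--             i += 1
--         return pairs
--     return list(history)
-- ===== SOURCE B (Python) =====
-- def _history_to_tuples(history: list) -> list:
--     """Convert Gradio 4 message list to (user, assistant) pairs for internal use."""
--     if not history:
--         return []
--     if isinstance(history[0], dict):
--         pairs = []
--         pending = None  # content of a user message awaiting its assistant reply
--         for msg in history:
--             role = msg.get("role", "")
--             content = msg.get("content", "") or ""
--             if role == "user":
--                 if pending is not None:
--                     pairs.append((pending, ""))
--                 pending = content
--             elif role == "assistant":
--                 if pending is not None:
--                     pairs.append((pending, content))
--                 pending = None
--             else:
--                 if pending is not None: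
--                     pairs.append((pending, ""))
--                 pending = None
--         if pending is not None:
--             pairs.append((pending, ""))
--         return pairs
--     return list(history)
-- ===== Notes on version B (the rewrite author's own statement) =====
-- stated objective: simpler
-- what changed: Replaces A's index-based while loop with look-ahead at history[i+1] by a single for-loop state machine that carries a pending user message and flushes it on the next message or at the end; Pre_ only excludes Lean-side association lists that bind the 'role' or 'content' key twice, which no Python dict input can be, so nothing A accepts is excluded.
import Mathlib
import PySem

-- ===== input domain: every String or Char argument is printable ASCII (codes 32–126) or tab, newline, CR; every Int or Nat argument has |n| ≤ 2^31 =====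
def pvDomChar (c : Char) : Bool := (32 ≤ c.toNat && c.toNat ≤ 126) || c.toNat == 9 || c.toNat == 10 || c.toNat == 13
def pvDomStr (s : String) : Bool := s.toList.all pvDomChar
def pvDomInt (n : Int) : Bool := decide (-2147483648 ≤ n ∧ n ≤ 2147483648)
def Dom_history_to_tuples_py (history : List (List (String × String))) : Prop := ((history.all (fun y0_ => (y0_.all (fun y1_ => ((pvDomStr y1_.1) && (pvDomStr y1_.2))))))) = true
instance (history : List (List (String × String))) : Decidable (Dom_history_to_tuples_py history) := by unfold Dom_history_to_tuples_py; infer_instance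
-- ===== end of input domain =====

-- B replaces A's index-based while loop with look-ahead by a single left-to-right fold that
-- carries a pending user message (objective: simpler decomposition, same O(n) cost).
-- Under the type convention every element is a dict, so the `isinstance(history[0], dict)`
-- test is always true and the `return list(history)` branch is unreachable; both ports
-- therefore carry only the empty guard and the dict branch.

-- ===== PORT A =====
-- while-loop of A: state is the index i and the accumulated pairs
def pvALoop (h : List (List (String × String))) (pairs : List (String × String)) (i : Nat) : List (String × String) :=
  if hlt : i < h.length then
    let msg := PySem.Dict.mk (h.getD i [])
    let role := msg.getD "role" ""
    let c := msg.getD "content" ""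
    let content := if c = "" then "" else c   -- `or ""`
    if role = "user" then
      if i + 1 < h.length ∧ (PySem.Dict.mk (h.getD (i + 1) [])).get? "role" = some "assistant" then
        let c2 := (PySem.Dict.mk (h.getD (i + 1) [])).getD "content" ""
        let asst := if c2 = "" then "" else c2   -- `or ""`
        pvALoop h (pairs ++ [(content, asst)]) (i + 2)
      else
        pvALoop h (pairs ++ [(content, "")]) (i + 1)
    else
      pvALoop h pairs (i + 1)
  else pairs
termination_by h.length - i
decreasing_by all_goals omega

def history_to_tuples_py (history : List (List (String × String))) : List (String × String) :=
  if history.isEmpty then [] else pvALoop history [] 0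

-- ===== PORT B =====
-- one fold step of B: state is (pairs, pending user content)
def pvBStep (st : List (String × String) × Option String) (msg0 : List (String × String)) :
    List (String × String) × Option String :=
  let msg := PySem.Dict.mk msg0
  let role := msg.getD "role" ""
  let c := msg.getD "content" ""
  let content := if c = "" then "" else c   -- `or ""`
  if role = "user" then
    ((match st.2 with | some p => st.1 ++ [(p, "")] | none => st.1), some content)
  else if role = "assistant" then
    ((match st.2 with | some p => st.1 ++ [(p, content)] | none => st.1), none)
  else
    ((match st.2 with | some p => st.1 ++ [(p, "")] | none => st.1), none)

def history_to_tuples_py_alt (history : List (List (String × String))) : List (String × String) :=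
  if history.isEmpty then []
  else
    let st := history.foldl pvBStep ([], none)
    match st.2 with
    | some p => st.1 ++ [(p, "")]
    | none => st.1

-- ===== PRECONDITION & SPEC =====
-- Pre_ excludes only association lists in which a message binds the "role" or "content" key twice:
-- such a list does not arise from any Python dict (dict keys are unique), so no input A accepts is excluded.
def Pre_history_to_tuples_py (history : List (List (String × String))) : Prop :=
  (history.all (fun m => decide ((m.map Prod.fst).count "role" ≤ 1 ∧ (m.map Prod.fst).count "content" ≤ 1))) = true
instance (history : List (List (String × String))) : Decidable (Pre_history_to_tuples_py history) := by unfold Pre_history_to_tuples_py; infer_instance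
def pvWitness_history_to_tuples_py : (List (List (String × String))) :=
  [[("role", "user"), ("content", "hello")], [("role", "assistant"), ("content", "hi there")],
   [("role", "user"), ("content", "bye")]]

def Spec_history_to_tuples_py (history : List (List (String × String))) (out : List (String × String)) : Prop := out = history_to_tuples_py_alt history
instance (history : List (List (String × String))) (out : List (String × String)) : Decidable (Spec_history_to_tuples_py history out) := by unfold Spec_history_to_tuples_py; infer_instance

-- ===== CLAIM (what is proved, stated in full; the proofs are below) =====
def Claim_equal_history_to_tuples_py : Prop := ∀ (history : List (List (String × String))), Dom_history_to_tuples_py history → Pre_history_to_tuples_py history → Spec_history_to_tuples_py history (history_to_tuples_py history)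

-- ===== LEMMAS AND PROOFS =====

def pvRole (m : List (String × String)) : String := (PySem.Dict.mk m).getD "role" ""
def pvCont (m : List (String × String)) : String :=
  let c := (PySem.Dict.mk m).getD "content" ""
  if c = "" then "" else c

-- list-structural characterisation of A's while loop
def pvF : List (List (String × String)) → List (String × String)
  | [] => []
  | m :: rest =>
    if pvRole m = "user" then
      match rest with
      | m2 :: rest2 =>
        if (PySem.Dict.mk m2).get? "role" = some "assistant" then
          (pvCont m, pvCont m2) :: pvF rest2
        else
          (pvCont m, "") :: pvF (m2 :: rest2)
      | [] => [(pvCont m, "")]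
    else pvF rest
termination_by xs => xs.length
decreasing_by all_goals (simp only [List.length_cons]; omega)

-- state-machine characterisation of B's fold (pending-first form)
def pvG : Option String → List (List (String × String)) → List (String × String)
  | none, [] => []
  | some p, [] => [(p, "")]
  | pend, m :: rest =>
    if pvRole m = "user" then
      (match pend with | some p => [(p, "")] | none => []) ++ pvG (some (pvCont m)) rest
    else if pvRole m = "assistant" then
      (match pend with | some p => [(p, pvCont m)] | none => []) ++ pvG none rest
    else
      (match pend with | some p => [(p, "")] | none => []) ++ pvG none rest

def pvFlush (st : List (String × String) × Option String) : List (String × String) :=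
  match st.2 with
  | some p => st.1 ++ [(p, "")]
  | none => st.1

theorem pvRole_assistant_iff (m : List (String × String)) :
    pvRole m = "assistant" ↔ (PySem.Dict.mk m).get? "role" = some "assistant" := by
  unfold pvRole
  rw [PySem.Dict.getD_eq_get?_getD]
  cases h : (PySem.Dict.mk m).get? "role" <;> simp

theorem pvB_fold (xs : List (List (String × String))) :
    ∀ pairs pend, pvFlush (xs.foldl pvBStep (pairs, pend)) = pairs ++ pvG pend xs := by
  induction xs with
  | nil => intro pairs pend; cases pend <;> simp [pvFlush, pvG]
  | cons m rest ih =>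
    intro pairs pend
    simp only [List.foldl_cons]
    by_cases hu : pvRole m = "user"
    · have hstep : pvBStep (pairs, pend) m =
          ((match pend with | some p => pairs ++ [(p, "")] | none => pairs), some (pvCont m)) := by
        simp [pvBStep, pvRole, pvCont] at hu ⊢; simp [hu]
      rw [hstep, ih]
      cases pend <;> simp [pvG, hu]
    · by_cases ha : pvRole m = "assistant"
      · have hstep : pvBStep (pairs, pend) m =
            ((match pend with | some p => pairs ++ [(p, pvCont m)] | none => pairs), none) := by
          simp [pvBStep, pvRole, pvCont] at hu ha ⊢; simp [ha]
        rw [hstep, ih]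
        cases pend <;> simp [pvG, hu, ha]
      · have hstep : pvBStep (pairs, pend) m =
            ((match pend with | some p => pairs ++ [(p, "")] | none => pairs), none) := by
          simp [pvBStep, pvRole] at hu ha ⊢; simp [hu, ha]
        rw [hstep, ih]
        cases pend <;> simp [pvG, hu, ha]

theorem pvG_flush (p : String) (xs : List (List (String × String)))
    (h : ∀ m r, xs = m :: r → pvRole m ≠ "assistant") :
    pvG (some p) xs = (p, "") :: pvG none xs := by
  cases xs with
  | nil => simp [pvG]
  | cons m r =>
    have hm := h m r rfl
    by_cases hu : pvRole m = "user" <;> simp [pvG, hu, hm]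

theorem pvF_eq_pvG (xs : List (List (String × String))) : pvF xs = pvG none xs := by
  induction xs using pvF.induct with
  | case1 => simp [pvF, pvG]
  | case2 m hu m2 rest2 ha ih =>
    have ha' : pvRole m2 = "assistant" := (pvRole_assistant_iff m2).2 ha
    simp [pvF, pvG, hu, ha, ha', ih]
  | case3 m hu m2 rest2 ha ih =>
    have ha' : pvRole m2 ≠ "assistant" := fun h => ha ((pvRole_assistant_iff m2).1 h)
    rw [pvF, pvG]
    simp only [hu, ha, ite_false]
    rw [pvG_flush (pvCont m) (m2 :: rest2) (by intro a b hab hr; injection hab with h1 _; exact ha' (h1 ▸ hr))]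
    simp [ih]
  | case4 m hu => simp [pvF, pvG, hu]
  | case5 m rest hu ih =>
    rw [pvF.eq_def]
    cases rest with
    | nil => simp [pvF, pvG, hu]
    | cons m2 r2 =>
      simp only [hu, if_neg, not_false_eq_true]
      rw [ih]
      by_cases ha : pvRole m = "assistant" <;> simp [pvG, hu, ha]

theorem pvALoop_eq (h : List (List (String × String))) :
    ∀ n i pairs, h.length - i ≤ n → pvALoop h pairs i = pairs ++ pvF (h.drop i) := by
  intro n
  induction n with
  | zero =>
    intro i pairs hle
    have hge : h.length ≤ i := by omega
    rw [pvALoop]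
    simp [Nat.not_lt.2 hge, List.drop_eq_nil_of_le hge, pvF]
  | succ n ih =>
    intro i pairs hle
    by_cases hlt : i < h.length
    · have hdrop : h.drop i = h[i] :: h.drop (i + 1) := List.drop_eq_getElem_cons hlt
      have hgd : h.getD i [] = h[i] := List.getD_eq_getElem h [] hlt
      rw [pvALoop]
      simp only [hlt, dif_pos]
      by_cases hu : pvRole (h[i]) = "user"
      · have hu' : (PySem.Dict.mk (h.getD i [])).getD "role" "" = "user" := by
          rw [hgd]; exact hu
        by_cases hla : i + 1 < h.length ∧ (PySem.Dict.mk (h.getD (i + 1) [])).get? "role" = some "assistant"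
        · obtain ⟨hl1, hr1⟩ := hla
          have hgd1 : h.getD (i + 1) [] = h[i + 1] := List.getD_eq_getElem h [] hl1
          have hdrop1 : h.drop (i + 1) = h[i + 1] :: h.drop (i + 2) := List.drop_eq_getElem_cons hl1
          rw [if_pos hu', if_pos ⟨hl1, hr1⟩, ih (i + 2) _ (by omega)]
          rw [hdrop, hdrop1, pvF]
          rw [hgd1] at hr1
          simp [hu, hr1, pvCont, List.getD, hlt, hl1]
        · rw [if_pos hu', if_neg hla, ih (i + 1) _ (by omega)]
          rw [hdrop]
          cases hd1 : h.drop (i + 1) with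
          | nil => simp [pvF, hu, pvCont, List.getD, hlt]
          | cons m2 r2 =>
            have hl1 : i + 1 < h.length := by
              by_contra hge
              rw [List.drop_eq_nil_of_le (by omega)] at hd1; exact (List.cons_ne_nil _ _) hd1.symm
            have hgd1 : h.getD (i + 1) [] = h[i + 1] := List.getD_eq_getElem h [] hl1
            have hm2 : m2 = h[i + 1] := by
              have := List.drop_eq_getElem_cons hl1
              rw [hd1] at this; exact (List.cons.injEq .. ▸ this).1
            have hna : ¬ (PySem.Dict.mk m2).get? "role" = some "assistant" := by
              intro hc; exact hla ⟨hl1, by rw [hgd1, ← hm2]; exact hc⟩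
            simp [pvF, hu, hna, pvCont, List.getD, hlt]
      · have hu' : ¬ (PySem.Dict.mk (h.getD i [])).getD "role" "" = "user" := by
          rw [hgd]; exact hu
        rw [if_neg hu', ih (i + 1) _ (by omega)]
        rw [hdrop]
        cases hd1 : h.drop (i + 1) with
        | nil => simp [pvF, hu]
        | cons m2 r2 => simp [pvF, hu]
    · rw [pvALoop]
      simp [hlt, List.drop_eq_nil_of_le (by omega : h.length ≤ i), pvF]

-- ===== VERDICT (by name: the statement is the Claim_ definition above) =====
theorem history_to_tuples_py_spec : Claim_equal_history_to_tuples_py := by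
  intro history _ _
  unfold Spec_history_to_tuples_py history_to_tuples_py history_to_tuples_py_alt
  by_cases he : history.isEmpty
  · simp [he]
  · simp only [he, if_neg, Bool.false_eq_true, not_false_eq_true]
    have hA : pvALoop history [] 0 = pvF history := by
      have := pvALoop_eq history history.length 0 [] (by omega)
      simpa using this
    have hB : pvFlush (history.foldl pvBStep ([], none)) = pvG none history := by
      simpa using pvB_fold history [] none
    rw [hA, pvF_eq_pvG, ← hB]
    rfl
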